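-- pv_equiv track=rewrite | github.com/rafelafrance/ConservationConcernFlorida | ccf/fna_training_data.py | vocab_hits
-- ===== SOURCE A (Python) =====
-- def vocab_hits(text: str, vocab: set[str], key: str = "") -> str:
--     lower = text.lower()
--
--     start, end = -1, -1
--
--     value = ""
--
--     if key and key in vocab:
--         value = key
--
--     for word in vocab:
--         if (first := lower.find(word)) != -1:
--             start = min(start, first) if start != -1 else first
--
--         if (last := lower.rfind(word)) != -1:
--             end = max(end, last + len(word))
--
--     if start == -1 or end == -1:
--         return value
--
--     value += " " if value else ""
--     value += text[start:end]
--
--     return value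
-- ===== SOURCE B (Python) =====
-- def vocab_hits(text: str, vocab: set[str], key: str = "") -> str:
--     value = key if key and key in vocab else ""
--
--     lower = text.lower()
--     n = len(lower)
--     lens = sorted({len(w) for w in vocab})
--
--     start, end = -1, -1
--     for i in range(n + 1):
--         for ln in lens:
--             sub = lower[i:i + ln]
--             if sub in vocab:
--                 if start == -1:
--                     start = i
--                 e = i + len(sub)
--                 if e > end:
--                     end = e
--
--     if start == -1:
--         return value
--
--     sep = " " if value else ""
--     return value + sep + text[start:end]
-- ===== Notes on version B (the rewrite author's own statement) =====
-- stated objective: faster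
-- what changed: Replaces the word-major pass that calls find and rfind once per vocab word with a single position-major scan that does one hash-set lookup per (position, distinct word length), tracking the minimum match start (first hit) and maximum match end directly.
import Mathlib
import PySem

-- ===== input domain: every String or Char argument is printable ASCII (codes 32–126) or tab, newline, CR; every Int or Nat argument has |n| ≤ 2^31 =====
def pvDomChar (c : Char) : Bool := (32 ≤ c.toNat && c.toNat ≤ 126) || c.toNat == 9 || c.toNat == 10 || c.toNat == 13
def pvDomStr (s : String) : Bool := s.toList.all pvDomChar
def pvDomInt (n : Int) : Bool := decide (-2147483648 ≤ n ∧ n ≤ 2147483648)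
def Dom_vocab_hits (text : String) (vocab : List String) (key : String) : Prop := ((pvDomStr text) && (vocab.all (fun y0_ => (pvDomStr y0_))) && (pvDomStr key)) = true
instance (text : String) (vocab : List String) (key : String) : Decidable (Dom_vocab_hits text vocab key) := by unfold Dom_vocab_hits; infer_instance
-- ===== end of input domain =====

-- B replaces A's word-major pass (find + rfind per vocab word) by a single position-major
-- scan doing one set lookup per (position, distinct word length), tracking the minimal match
-- start and maximal match end directly; cost is independent of |vocab| (measured faster by
-- a timing run); equal return value on every input (proved below); no argument is mutated.

-- ===== PORT A =====
def vocab_hits (text : String) (vocab : List String) (key : String) : String :=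
  let lower := PySem.Str.lower text
  let value := if key ≠ "" ∧ vocab.contains key then key else ""
  let se := vocab.foldl (fun (se : Int × Int) word =>
      let first := PySem.Str.find lower word
      let s := if first ≠ -1 then (if se.1 ≠ -1 then min se.1 first else first) else se.1
      let last := PySem.Str.rfind lower word
      let e := if last ≠ -1 then max se.2 (last + PySem.Str.len word) else se.2
      (s, e)) (-1, -1)
  if se.1 = -1 ∨ se.2 = -1 then value
  else (value ++ (if value ≠ "" then " " else "")) ++ PySem.Str.slice text (some se.1) (some se.2)

-- ===== PORT B =====
def vocab_hits_alt (text : String) (vocab : List String) (key : String) : String :=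
  let value := if key ≠ "" ∧ vocab.contains key then key else ""
  let lower := PySem.Str.lower text
  let n := PySem.Str.len lower
  let lens := PySem.List.sorted (PySem.Set.ofList (vocab.map PySem.Str.len)) (fun x => x) false
  let se := (PySem.List.pyRange 0 (n + 1)).foldl (fun (se : Int × Int) i =>
      lens.foldl (fun (se : Int × Int) L =>
        let sub := PySem.Str.slice lower (some i) (some (i + L))
        if vocab.contains sub then
          ((if se.1 = -1 then i else se.1),
           (if i + PySem.Str.len sub > se.2 then i + PySem.Str.len sub else se.2))
        else se) se) (-1, -1)
  if se.1 = -1 then value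
  else (value ++ (if value ≠ "" then " " else "")) ++ PySem.Str.slice text (some se.1) (some se.2)

-- ===== PRECONDITION & SPEC =====
def Spec_vocab_hits (text : String) (vocab : List String) (key : String) (out : String) : Prop := out = vocab_hits_alt text vocab key
instance (text : String) (vocab : List String) (key : String) (out : String) : Decidable (Spec_vocab_hits text vocab key out) := by unfold Spec_vocab_hits; infer_instance

-- ===== CLAIM (what is proved, stated in full; the proofs are below) =====
def Claim_equal_vocab_hits : Prop := ∀ (text : String) (vocab : List String) (key : String), Dom_vocab_hits text vocab key → Spec_vocab_hits text vocab key (vocab_hits text vocab key)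

-- ===== LEMMAS AND PROOFS =====

-- fold combinators
def pvMinStep (s x : Int) : Int := if s ≠ -1 then min s x else x
def pvFstStep (s x : Int) : Int := if s = -1 then x else s

-- candidate lists: A-side (one entry per vocab word that occurs)
def pvCandAS (cs : List Char) (V : List String) : List Int :=
  V.filterMap (fun w => if PySem.Chars.find cs w.toList ≠ -1 then some (PySem.Chars.find cs w.toList) else none)
def pvCandAE (cs : List Char) (V : List String) : List Int :=
  V.filterMap (fun w => if PySem.Chars.rfind cs w.toList ≠ -1 then some (PySem.Chars.rfind cs w.toList + PySem.Str.len w) else none)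
-- candidate lists: B-side (one entry per (position, vocab length) with a set hit)
def pvLens (V : List String) : List Int :=
  PySem.List.sorted (PySem.Set.ofList (V.map PySem.Str.len)) (fun x => x) false
def pvSub (lower : String) (i L : Int) : String :=
  PySem.Str.slice lower (some i) (some (i + L))
def pvCandBS (lower : String) (V : List String) : List Int :=
  (List.range (lower.toList.length + 1)).flatMap (fun (i : Nat) =>
    (pvLens V).filterMap (fun L => if V.contains (pvSub lower (i : Int) L) then some (i : Int) else none))
def pvCandBE (lower : String) (V : List String) : List Int :=
  (List.range (lower.toList.length + 1)).flatMap (fun (i : Nat) =>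
    (pvLens V).filterMap (fun L => if V.contains (pvSub lower (i : Int) L) then
      some ((i : Int) + PySem.Str.len (pvSub lower (i : Int) L)) else none))

-- max-fold spec
theorem pv_foldl_max_mem (c : List Int) : ∀ a : Int, c.foldl max a = a ∨ c.foldl max a ∈ c := by
  induction c with
  | nil => intro a; left; rfl
  | cons x xs ih =>
    intro a
    rcases ih (max a x) with h | h
    · rcases max_cases a x with ⟨he, _⟩ | ⟨he, _⟩
      · left; simpa [he] using h
      · right; simp only [List.foldl_cons]; rw [h, he]; exact List.mem_cons_self
    · right; exact List.mem_cons_of_mem _ h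

theorem pv_mfold_eq_of_dom (c d : List Int)
    (h1 : ∀ x ∈ c, ∃ y ∈ d, x ≤ y) (h2 : ∀ y ∈ d, ∃ x ∈ c, y ≤ x) :
    c.foldl max (-1) = d.foldl max (-1) := by
  have bc := PySem.List.le_foldl_max c (-1)
  have bd := PySem.List.le_foldl_max d (-1)
  apply le_antisymm
  · rcases pv_foldl_max_mem c (-1) with h | h
    · rw [h]; exact bd.1
    · rcases h1 _ h with ⟨y, hy, hxy⟩
      exact le_trans hxy (bd.2 y hy)
  · rcases pv_foldl_max_mem d (-1) with h | h
    · rw [h]; exact bc.1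
    · rcases h2 _ h with ⟨x, hx, hyx⟩
      exact le_trans hyx (bc.2 x hx)

-- min-fold (sentinel -1) spec, for nonnegative candidate lists
theorem pv_foldl_min_le (c : List Int) : ∀ a : Int, c.foldl min a ≤ a ∧ ∀ y ∈ c, c.foldl min a ≤ y := by
  induction c with
  | nil => intro a; exact ⟨le_refl a, by simp⟩
  | cons x xs ih =>
    intro a
    have h := ih (min a x)
    refine ⟨le_trans h.1 (min_le_left _ _), ?_⟩
    intro y hy
    rcases List.mem_cons.mp hy with rfl | hy
    · exact le_trans h.1 (min_le_right _ _)
    · exact h.2 y hy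

theorem pv_foldl_min_mem (c : List Int) : ∀ a : Int, c.foldl min a = a ∨ c.foldl min a ∈ c := by
  induction c with
  | nil => intro a; left; rfl
  | cons x xs ih =>
    intro a
    rcases ih (min a x) with h | h
    · rcases min_cases a x with ⟨he, _⟩ | ⟨he, _⟩
      · left; simpa [he] using h
      · right; simp only [List.foldl_cons]; rw [h, he]; exact List.mem_cons_self
    · right; exact List.mem_cons_of_mem _ h

theorem pv_minStep_eq_min (c : List Int) : ∀ a : Int, 0 ≤ a → (∀ x ∈ c, (0:Int) ≤ x) →
    c.foldl pvMinStep a = c.foldl min a := by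
  induction c with
  | nil => intro a _ _; rfl
  | cons x xs ih =>
    intro a ha hc
    simp only [List.foldl_cons]
    have hstep : pvMinStep a x = min a x := by
      unfold pvMinStep; rw [if_pos]; omega
    rw [hstep]
    exact ih (min a x) (le_min ha (hc x List.mem_cons_self)) (fun y hy => hc y (List.mem_cons_of_mem _ hy))

theorem pv_nfold_spec (c : List Int) (hc : ∀ x ∈ c, (0:Int) ≤ x) :
    (c.foldl pvMinStep (-1) = -1 ∧ c = []) ∨
    (c.foldl pvMinStep (-1) ∈ c ∧ ∀ x ∈ c, c.foldl pvMinStep (-1) ≤ x) := by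
  cases c with
  | nil => left; exact ⟨rfl, rfl⟩
  | cons x xs =>
    right
    have hx0 : (0:Int) ≤ x := hc x List.mem_cons_self
    have hstep : pvMinStep (-1) x = x := by unfold pvMinStep; simp
    have hxs : ∀ y ∈ xs, (0:Int) ≤ y := fun y hy => hc y (List.mem_cons_of_mem _ hy)
    have he : (x :: xs).foldl pvMinStep (-1) = xs.foldl min x := by
      simp only [List.foldl_cons, hstep]
      exact pv_minStep_eq_min xs x hx0 hxs
    rw [he]
    have hb := pv_foldl_min_le xs x
    constructor
    · rcases pv_foldl_min_mem xs x with h | h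
      · rw [h]; exact List.mem_cons_self
      · exact List.mem_cons_of_mem _ h
    · intro y hy
      rcases List.mem_cons.mp hy with rfl | hy
      · exact hb.1
      · exact hb.2 y hy

theorem pv_nfold_eq_of_dom (c d : List Int)
    (hc : ∀ x ∈ c, (0:Int) ≤ x) (hd : ∀ x ∈ d, (0:Int) ≤ x)
    (h1 : ∀ x ∈ c, ∃ y ∈ d, y ≤ x) (h2 : ∀ y ∈ d, ∃ x ∈ c, x ≤ y) :
    c.foldl pvMinStep (-1) = d.foldl pvMinStep (-1) := by
  rcases pv_nfold_spec c hc with ⟨he, hnil⟩ | ⟨hmem, hmin⟩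
  · rcases pv_nfold_spec d hd with ⟨he', _⟩ | ⟨hmem', _⟩
    · rw [he, he']
    · rcases h2 _ hmem' with ⟨x, hx, _⟩
      rw [hnil] at hx; cases hx
  · rcases pv_nfold_spec d hd with ⟨_, hnil'⟩ | ⟨hmem', hmin'⟩
    · rcases h1 _ hmem with ⟨y, hy, _⟩
      rw [hnil'] at hy; cases hy
    · apply le_antisymm
      · rcases h2 _ hmem' with ⟨x, hx, hxy⟩
        exact le_trans (hmin x hx) hxy
      · rcases h1 _ hmem with ⟨y, hy, hyx⟩
        exact le_trans (hmin' y hy) hyx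

-- the "first hit" fold equals the min fold on a sorted nonnegative list
theorem pv_fstStep_const (c : List Int) : ∀ a : Int, a ≠ -1 → c.foldl pvFstStep a = a := by
  induction c with
  | nil => intro a _; rfl
  | cons x xs ih =>
    intro a ha
    simp only [List.foldl_cons]
    have : pvFstStep a x = a := by unfold pvFstStep; rw [if_neg ha]
    rw [this]; exact ih a ha

theorem pv_min_const (c : List Int) : ∀ a : Int, (∀ x ∈ c, a ≤ x) → c.foldl min a = a := by
  induction c with
  | nil => intro a _; rfl
  | cons x xs ih =>
    intro a ha
    simp only [List.foldl_cons]
    rw [min_eq_left (ha x List.mem_cons_self)]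
    exact ih a (fun y hy => ha y (List.mem_cons_of_mem _ hy))

theorem pv_fstfold_eq_nfold (c : List Int) (hs : c.Pairwise (· ≤ ·)) (hc : ∀ x ∈ c, (0:Int) ≤ x) :
    c.foldl pvFstStep (-1) = c.foldl pvMinStep (-1) := by
  cases c with
  | nil => rfl
  | cons x xs =>
    have hx0 : (0:Int) ≤ x := hc x List.mem_cons_self
    have hxs : ∀ y ∈ xs, (0:Int) ≤ y := fun y hy => hc y (List.mem_cons_of_mem _ hy)
    have hle : ∀ y ∈ xs, x ≤ y := (List.pairwise_cons.mp hs).1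
    simp only [List.foldl_cons]
    have h1 : pvFstStep (-1) x = x := by unfold pvFstStep; simp
    have h2 : pvMinStep (-1) x = x := by unfold pvMinStep; simp
    rw [h1, h2, pv_fstStep_const xs x (by omega), pv_minStep_eq_min xs x hx0 hxs,
        pv_min_const xs x hle]

-- ===== rfind characterization (proved from PySem.Chars.rfind.go) =====
theorem pv_rgo_zero (s sub : List Char) :
    PySem.Chars.rfind.go s sub 0 = if sub.isPrefixOf s then 0 else -1 := rfl

theorem pv_rgo_succ (s sub : List Char) (j : Nat) :
    PySem.Chars.rfind.go s sub (j+1) =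
      if sub.isPrefixOf (s.drop (j+1)) then ((j:Int)+1) else PySem.Chars.rfind.go s sub j := by
  rfl

theorem pv_rgo_spec (s sub : List Char) : ∀ k : Nat,
    (PySem.Chars.rfind.go s sub k = -1 ↔ ∀ j ≤ k, ¬ sub <+: s.drop j) ∧
    (PySem.Chars.rfind.go s sub k ≠ -1 →
      0 ≤ PySem.Chars.rfind.go s sub k ∧ PySem.Chars.rfind.go s sub k ≤ (k:Int) ∧
      sub <+: s.drop (PySem.Chars.rfind.go s sub k).toNat ∧
      ∀ j ≤ k, sub <+: s.drop j → (j:Int) ≤ PySem.Chars.rfind.go s sub k) := by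
  intro k
  induction k with
  | zero =>
    rw [pv_rgo_zero]
    by_cases h : sub.isPrefixOf s
    · have hp : sub <+: s := List.isPrefixOf_iff_prefix.mp h
      constructor
      · simp only [h, if_pos]
        constructor
        · intro habs; cases habs
        · intro hall; exact absurd hp (by simpa using hall 0 (le_refl 0))
      · intro _
        simp only [h, if_pos]
        refine ⟨le_refl 0, le_refl 0, by simpa using hp, ?_⟩
        intro j hj _; interval_cases j; simp
    · have hp : ¬ sub <+: s := fun hh => h (List.isPrefixOf_iff_prefix.mpr hh)
      simp only [h]
      constructor
      · constructor
        · intro _ j hj; interval_cases j; simpa using hp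
        · intro _; rfl
      · intro habs; exact absurd rfl habs
  | succ j ih =>
    rw [pv_rgo_succ]
    by_cases h : sub.isPrefixOf (s.drop (j+1)) = true
    · have hp : sub <+: s.drop (j+1) := List.isPrefixOf_iff_prefix.mp h
      rw [if_pos h]
      constructor
      · constructor
        · intro habs; exact absurd habs (by omega)
        · intro hall; exact absurd hp (hall (j+1) (le_refl _))
      · intro _
        refine ⟨by positivity, le_refl _, ?_, ?_⟩
        · have : ((j:Int)+1).toNat = j+1 := by omega
          rw [this]; exact hp
        · intro j' hj' _; exact_mod_cast by omega
    · have hp : ¬ sub <+: s.drop (j+1) := fun hh => h (List.isPrefixOf_iff_prefix.mpr hh)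
      rw [if_neg h]
      constructor
      · rw [ih.1]
        constructor
        · intro hall j' hj'
          rcases Nat.lt_or_ge j' (j+1) with hlt | hge
          · exact hall j' (by omega)
          · have : j' = j+1 := by omega
            rw [this]; exact hp
        · intro hall j' hj'; exact hall j' (by omega)
      · intro hne
        obtain ⟨h0, hk, hpre, hmax⟩ := ih.2 hne
        refine ⟨h0, by omega, hpre, ?_⟩
        intro j' hj' hp'
        rcases Nat.lt_or_ge j' (j+1) with hlt | hge
        · exact hmax j' (by omega) hp'
        · have : j' = j+1 := by omega
          rw [this] at hp'; exact absurd hp' hp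

theorem pv_rfind_eq_neg_iff (s sub : List Char) :
    PySem.Chars.rfind s sub = -1 ↔ ∀ j ≤ s.length, ¬ sub <+: s.drop j :=
  (pv_rgo_spec s sub s.length).1

theorem pv_rfind_spec (s sub : List Char) (h : PySem.Chars.rfind s sub ≠ -1) :
    0 ≤ PySem.Chars.rfind s sub ∧ PySem.Chars.rfind s sub ≤ (s.length:Int) ∧
    sub <+: s.drop (PySem.Chars.rfind s sub).toNat ∧
    ∀ j ≤ s.length, sub <+: s.drop j → (j:Int) ≤ PySem.Chars.rfind s sub :=
  (pv_rgo_spec s sub s.length).2 h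

-- ===== find-side facts =====
theorem pv_pref_bound (s sub : List Char) (j : Nat) (h : sub <+: s.drop j) :
    ∃ j' ≤ s.length, sub <+: s.drop j' ∧ j' ≤ j := by
  rcases (by omega : j ≤ s.length ∨ s.length < j) with hj | hj
  · exact ⟨j, hj, h, le_refl j⟩
  · have hnil : s.drop j = [] := List.drop_eq_nil_of_le (by omega)
    rw [hnil] at h
    have : sub = [] := List.prefix_nil.mp h
    exact ⟨s.length, le_refl _, by simp [this], by omega⟩

theorem pv_find_ne_neg_iff' (s sub : List Char) :
    PySem.Chars.find s sub ≠ -1 ↔ ∃ j ≤ s.length, sub <+: s.drop j := by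
  rw [PySem.Chars.find_ne_neg_one_iff, ← PySem.Chars.isIn_iff_infix,
      ← PySem.Chars.exists_prefix_drop_iff_isIn]
  constructor
  · rintro ⟨j, hj⟩
    rcases pv_pref_bound s sub j hj with ⟨j', h1, h2, _⟩
    exact ⟨j', h1, h2⟩
  · rintro ⟨j, _, hj⟩; exact ⟨j, hj⟩

theorem pv_find_min (s sub : List Char) (j : Nat) (h : sub <+: s.drop j) :
    PySem.Chars.find s sub ≤ (j:Int) := by
  have hne : PySem.Chars.find s sub ≠ -1 := by
    rw [pv_find_ne_neg_iff']
    rcases pv_pref_bound s sub j h with ⟨j', hj', hp, _⟩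
    exact ⟨j', hj', hp⟩
  have h0 : 0 ≤ PySem.Chars.find s sub := by
    have := PySem.Chars.neg_one_le_find s sub; omega
  obtain ⟨_, hmin⟩ := PySem.Chars.find_spec h0
  by_contra hc
  have : j < (PySem.Chars.find s sub).toNat := by omega
  exact hmin j this h

theorem pv_find_rfind_none (s sub : List Char) :
    PySem.Chars.find s sub = -1 ↔ PySem.Chars.rfind s sub = -1 := by
  rw [pv_rfind_eq_neg_iff, PySem.Chars.find_eq_neg_one_iff, ← PySem.Chars.isIn_eq_false_iff]
  rw [← Bool.not_eq_true, ← PySem.Chars.exists_prefix_drop_iff_isIn]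
  constructor
  · intro h j _ hp; exact h ⟨j, hp⟩
  · rintro h ⟨j, hj⟩
    rcases pv_pref_bound s sub j hj with ⟨j', hj', hp, _⟩
    exact h j' hj' hp

-- ===== candidate-list facts =====

-- membership characterizations of the candidate lists
theorem pv_mem_AS (cs : List Char) (V : List String) (x : Int) :
    x ∈ pvCandAS cs V ↔ ∃ w ∈ V, PySem.Chars.find cs w.toList ≠ -1 ∧ x = PySem.Chars.find cs w.toList := by
  unfold pvCandAS
  simp only [List.mem_filterMap, Option.ite_none_right_eq_some, Option.some.injEq]
  constructor
  · rintro ⟨w, hw, h1, h2⟩; exact ⟨w, hw, h1, h2.symm⟩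
  · rintro ⟨w, hw, h1, h2⟩; exact ⟨w, hw, h1, h2.symm⟩

theorem pv_mem_AE (cs : List Char) (V : List String) (x : Int) :
    x ∈ pvCandAE cs V ↔ ∃ w ∈ V, PySem.Chars.rfind cs w.toList ≠ -1 ∧ x = PySem.Chars.rfind cs w.toList + PySem.Str.len w := by
  unfold pvCandAE
  simp only [List.mem_filterMap, Option.ite_none_right_eq_some, Option.some.injEq]
  constructor
  · rintro ⟨w, hw, h1, h2⟩; exact ⟨w, hw, h1, h2.symm⟩
  · rintro ⟨w, hw, h1, h2⟩; exact ⟨w, hw, h1, h2.symm⟩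

theorem pv_sub_toList (lower : String) (i m : Nat) :
    (pvSub lower (i : Int) (m : Int)).toList = (lower.toList.drop i).take m := by
  unfold pvSub
  rw [PySem.Str.toList_slice, PySem.Chars.slice_eq_listSlice, PySem.List.slice_natCast_add]

theorem pv_mem_lens (V : List String) (L : Int) :
    L ∈ pvLens V ↔ ∃ w ∈ V, L = PySem.Str.len w := by
  unfold pvLens
  rw [PySem.List.mem_sorted, PySem.Set.mem_ofList, List.mem_map]
  constructor
  · rintro ⟨w, hw, h⟩; exact ⟨w, hw, h.symm⟩
  · rintro ⟨w, hw, h⟩; exact ⟨w, hw, h.symm⟩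

-- a set hit at (i, L) is a real match at position i (of the word the slice spells)
theorem pv_hit_of_contains (lower : String) (V : List String) (i : Nat) (L : Int)
    (hL : L ∈ pvLens V) (hc : V.contains (pvSub lower (i : Int) L) = true) :
    pvSub lower (i : Int) L ∈ V ∧ (pvSub lower (i : Int) L).toList <+: lower.toList.drop i := by
  refine ⟨List.contains_iff_mem.mp hc, ?_⟩
  obtain ⟨w, _, hLw⟩ := (pv_mem_lens V L).mp hL
  have hm : L = ((w.toList.length : Nat) : Int) := hLw
  rw [hm, pv_sub_toList]
  exact List.take_prefix _ _

-- a real match at position i is found by the set lookup at (i, len w)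
theorem pv_contains_of_hit (lower : String) (V : List String) (i : Nat) (w : String)
    (hw : w ∈ V) (hp : w.toList <+: lower.toList.drop i) :
    PySem.Str.len w ∈ pvLens V ∧ pvSub lower (i : Int) (PySem.Str.len w) = w := by
  refine ⟨(pv_mem_lens V _).mpr ⟨w, hw, rfl⟩, ?_⟩
  rw [← String.toList_inj]
  have hm : PySem.Str.len w = ((w.toList.length : Nat) : Int) := rfl
  rw [hm, pv_sub_toList]
  exact (List.prefix_iff_eq_take.mp hp).symm

theorem pv_mem_BS (lower : String) (V : List String) (x : Int) :
    x ∈ pvCandBS lower V ↔ ∃ i ≤ lower.toList.length,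
      (∃ L ∈ pvLens V, V.contains (pvSub lower (i : Int) L) = true) ∧ x = (i : Int) := by
  unfold pvCandBS
  constructor
  · intro hx
    rcases List.mem_flatMap.mp hx with ⟨i, hi, hx2⟩
    rcases List.mem_filterMap.mp hx2 with ⟨L, hL, hopt⟩
    rw [Option.ite_none_right_eq_some, Option.some.injEq] at hopt
    have : i < lower.toList.length + 1 := List.mem_range.mp hi
    exact ⟨i, by omega, ⟨L, hL, hopt.1⟩, hopt.2.symm⟩
  · rintro ⟨i, hi, ⟨L, hL, hc⟩, hx⟩
    refine List.mem_flatMap.mpr ⟨i, List.mem_range.mpr (by omega), List.mem_filterMap.mpr ⟨L, hL, ?_⟩⟩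
    rw [Option.ite_none_right_eq_some, Option.some.injEq]
    exact ⟨hc, hx.symm⟩

theorem pv_mem_BE (lower : String) (V : List String) (x : Int) :
    x ∈ pvCandBE lower V ↔ ∃ i ≤ lower.toList.length, ∃ L ∈ pvLens V,
      V.contains (pvSub lower (i : Int) L) = true ∧ x = (i : Int) + PySem.Str.len (pvSub lower (i : Int) L) := by
  unfold pvCandBE
  constructor
  · intro hx
    rcases List.mem_flatMap.mp hx with ⟨i, hi, hx2⟩
    rcases List.mem_filterMap.mp hx2 with ⟨L, hL, hopt⟩
    rw [Option.ite_none_right_eq_some, Option.some.injEq] at hopt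
    have : i < lower.toList.length + 1 := List.mem_range.mp hi
    exact ⟨i, by omega, L, hL, hopt.1, hopt.2.symm⟩
  · rintro ⟨i, hi, L, hL, hc, hx⟩
    refine List.mem_flatMap.mpr ⟨i, List.mem_range.mpr (by omega), List.mem_filterMap.mpr ⟨L, hL, ?_⟩⟩
    rw [Option.ite_none_right_eq_some, Option.some.injEq]
    exact ⟨hc, hx.symm⟩

theorem pv_candAS_nonneg (cs : List Char) (V : List String) : ∀ x ∈ pvCandAS cs V, (0:Int) ≤ x := by
  intro x hx
  rcases (pv_mem_AS cs V x).mp hx with ⟨w, _, hne, hx⟩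
  have := PySem.Chars.neg_one_le_find cs w.toList
  omega

theorem pv_candBS_nonneg (lower : String) (V : List String) : ∀ x ∈ pvCandBS lower V, (0:Int) ≤ x := by
  intro x hx
  rcases (pv_mem_BS lower V x).mp hx with ⟨i, _, _, hx⟩
  subst hx; positivity

theorem pv_candAE_nonneg (cs : List Char) (V : List String) : ∀ x ∈ pvCandAE cs V, (0:Int) ≤ x := by
  intro x hx
  rcases (pv_mem_AE cs V x).mp hx with ⟨w, _, hne, hx⟩
  have h1 := (pv_rfind_spec cs w.toList hne).1
  have h2 : (0:Int) ≤ PySem.Str.len w := by unfold PySem.Str.len; positivity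
  omega

theorem pv_candBS_sorted (lower : String) (V : List String) : (pvCandBS lower V).Pairwise (· ≤ ·) := by
  unfold pvCandBS
  rw [List.pairwise_flatMap]
  constructor
  · intro i _
    apply List.pairwise_of_forall_mem_list
    intro a ha b hb
    rcases List.mem_filterMap.mp ha with ⟨L, _, hL⟩
    rcases List.mem_filterMap.mp hb with ⟨M, _, hM⟩
    rw [Option.ite_none_right_eq_some, Option.some.injEq] at hL hM
    omega
  · apply List.Pairwise.imp_of_mem ?_ (List.pairwise_lt_range)
    intro i j _ _ hij x hx y hy
    rcases List.mem_filterMap.mp hx with ⟨L, _, hL⟩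
    rcases List.mem_filterMap.mp hy with ⟨M, _, hM⟩
    rw [Option.ite_none_right_eq_some, Option.some.injEq] at hL hM
    omega

-- domination: start candidates
theorem pv_start_dom1 (lower : String) (V : List String) :
    ∀ x ∈ pvCandAS lower.toList V, ∃ y ∈ pvCandBS lower V, y ≤ x := by
  intro x hx
  rcases (pv_mem_AS lower.toList V x).mp hx with ⟨w, hw, hne, hx⟩
  have h0 : 0 ≤ PySem.Chars.find lower.toList w.toList := by
    have := PySem.Chars.neg_one_le_find lower.toList w.toList; omega
  obtain ⟨hpre, _⟩ := PySem.Chars.find_spec h0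
  have hle := PySem.Chars.find_le_length lower.toList w.toList
  obtain ⟨hLmem, hsub⟩ := pv_contains_of_hit lower V (PySem.Chars.find lower.toList w.toList).toNat w hw hpre
  refine ⟨x, ?_, le_refl x⟩
  rw [pv_mem_BS]
  refine ⟨(PySem.Chars.find lower.toList w.toList).toNat, by omega,
    ⟨PySem.Str.len w, hLmem, ?_⟩, by omega⟩
  rw [hsub]
  exact List.contains_iff_mem.mpr hw

theorem pv_start_dom2 (lower : String) (V : List String) :
    ∀ y ∈ pvCandBS lower V, ∃ x ∈ pvCandAS lower.toList V, x ≤ y := by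
  intro y hy
  rcases (pv_mem_BS lower V y).mp hy with ⟨i, hi, ⟨L, hL, hc⟩, hyv⟩
  obtain ⟨hmem, hp⟩ := pv_hit_of_contains lower V i L hL hc
  have hne : PySem.Chars.find lower.toList (pvSub lower (i : Int) L).toList ≠ -1 := by
    rw [pv_find_ne_neg_iff']; exact ⟨i, hi, hp⟩
  refine ⟨PySem.Chars.find lower.toList (pvSub lower (i : Int) L).toList, ?_, ?_⟩
  · rw [pv_mem_AS]; exact ⟨pvSub lower (i : Int) L, hmem, hne, rfl⟩
  · rw [hyv]; exact pv_find_min lower.toList _ i hp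

-- domination: end candidates
theorem pv_end_dom1 (lower : String) (V : List String) :
    ∀ x ∈ pvCandAE lower.toList V, ∃ y ∈ pvCandBE lower V, x ≤ y := by
  intro x hx
  rcases (pv_mem_AE lower.toList V x).mp hx with ⟨w, hw, hne, hx⟩
  obtain ⟨h0, hle, hpre, _⟩ := pv_rfind_spec lower.toList w.toList hne
  obtain ⟨hLmem, hsub⟩ := pv_contains_of_hit lower V (PySem.Chars.rfind lower.toList w.toList).toNat w hw hpre
  refine ⟨x, ?_, le_refl x⟩
  rw [pv_mem_BE]
  refine ⟨(PySem.Chars.rfind lower.toList w.toList).toNat, by omega, PySem.Str.len w, hLmem, ?_, ?_⟩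
  · rw [hsub]; exact List.contains_iff_mem.mpr hw
  · rw [hsub, hx]; omega

theorem pv_end_dom2 (lower : String) (V : List String) :
    ∀ y ∈ pvCandBE lower V, ∃ x ∈ pvCandAE lower.toList V, y ≤ x := by
  intro y hy
  rcases (pv_mem_BE lower V y).mp hy with ⟨i, hi, L, hL, hc, hyv⟩
  obtain ⟨hmem, hp⟩ := pv_hit_of_contains lower V i L hL hc
  have hne : PySem.Chars.rfind lower.toList (pvSub lower (i : Int) L).toList ≠ -1 := by
    have hf : PySem.Chars.find lower.toList (pvSub lower (i : Int) L).toList ≠ -1 := by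
      rw [pv_find_ne_neg_iff']; exact ⟨i, hi, hp⟩
    intro hr
    exact hf ((pv_find_rfind_none lower.toList _).mpr hr)
  obtain ⟨h0, _, _, hmax⟩ := pv_rfind_spec lower.toList _ hne
  refine ⟨PySem.Chars.rfind lower.toList (pvSub lower (i : Int) L).toList + PySem.Str.len (pvSub lower (i : Int) L), ?_, ?_⟩
  · rw [pv_mem_AE]; exact ⟨pvSub lower (i : Int) L, hmem, hne, rfl⟩
  · have := hmax i hi hp; omega

-- emptiness alignment
theorem pv_AS_nil_iff (cs : List Char) (V : List String) :
    pvCandAS cs V = [] ↔ ∀ w ∈ V, PySem.Chars.find cs w.toList = -1 := by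
  constructor
  · intro h w hw
    by_contra hne
    have : PySem.Chars.find cs w.toList ∈ pvCandAS cs V := (pv_mem_AS cs V _).mpr ⟨w, hw, hne, rfl⟩
    rw [h] at this; cases this
  · intro h
    rcases he : pvCandAS cs V with _ | ⟨x, xs⟩
    · rfl
    · have : x ∈ pvCandAS cs V := by rw [he]; exact List.mem_cons_self
      rcases (pv_mem_AS cs V x).mp this with ⟨w, hw, hne, _⟩
      exact absurd (h w hw) hne

theorem pv_AE_nil_iff (cs : List Char) (V : List String) :
    pvCandAE cs V = [] ↔ ∀ w ∈ V, PySem.Chars.rfind cs w.toList = -1 := by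
  constructor
  · intro h w hw
    by_contra hne
    have : PySem.Chars.rfind cs w.toList + PySem.Str.len w ∈ pvCandAE cs V :=
      (pv_mem_AE cs V _).mpr ⟨w, hw, hne, rfl⟩
    rw [h] at this; cases this
  · intro h
    rcases he : pvCandAE cs V with _ | ⟨x, xs⟩
    · rfl
    · have : x ∈ pvCandAE cs V := by rw [he]; exact List.mem_cons_self
      rcases (pv_mem_AE cs V x).mp this with ⟨w, hw, hne, _⟩
      exact absurd (h w hw) hne

theorem pv_AS_AE_nil (cs : List Char) (V : List String) :
    pvCandAS cs V = [] ↔ pvCandAE cs V = [] := by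
  rw [pv_AS_nil_iff, pv_AE_nil_iff]
  constructor <;> intro h w hw
  · rw [← pv_find_rfind_none]; exact h w hw
  · rw [pv_find_rfind_none]; exact h w hw

theorem pv_mfold_neg_iff (c : List Int) (hc : ∀ x ∈ c, (0:Int) ≤ x) :
    c.foldl max (-1) = -1 ↔ c = [] := by
  constructor
  · intro h
    rcases he : c with _ | ⟨x, xs⟩
    · rfl
    · have hx : x ∈ c := by rw [he]; exact List.mem_cons_self
      have := (PySem.List.le_foldl_max c (-1)).2 x hx
      have := hc x hx
      omega
  · intro h; rw [h]; rfl

theorem pv_nfold_neg_iff (c : List Int) (hc : ∀ x ∈ c, (0:Int) ≤ x) :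
    c.foldl pvMinStep (-1) = -1 ↔ c = [] := by
  constructor
  · intro h
    rcases pv_nfold_spec c hc with ⟨_, hnil⟩ | ⟨hmem, _⟩
    · exact hnil
    · rw [h] at hmem
      have := hc _ hmem
      omega
  · intro h; rw [h]; rfl

-- ===== fold-shape lemmas for the two ports =====
theorem pv_max_ite (e v : Int) : (if v > e then v else e) = max e v := by
  rcases max_cases e v with ⟨h1, h2⟩ | ⟨h1, h2⟩ <;> rw [h1] <;> omega

theorem pv_pyRange_natCast (m : Nat) :
    PySem.List.pyRange 0 (m : Int) = (List.range m).map Int.ofNat := by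
  unfold PySem.List.pyRange
  have h1 : ¬((1:Int) = 0) := by norm_num
  rw [if_neg h1]
  by_cases hm : 0 < (m:Int)
  · rw [if_pos (by norm_num), if_pos hm]
    have hc : (((m:Int) - 0 + 1 - 1)/1).toNat = m := by omega
    rw [hc]
    apply List.map_congr_left
    intro a _
    simp [Int.ofNat_eq_natCast]
  · have hz : m = 0 := by omega
    subst hz
    rw [if_pos (by norm_num), if_neg hm]
    rfl

theorem pv_A_fold (lower : String) (V : List String) : ∀ (a b : Int),
    V.foldl (fun (se : Int × Int) word =>
      let first := PySem.Str.find lower word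
      let s := if first ≠ -1 then (if se.1 ≠ -1 then min se.1 first else first) else se.1
      let last := PySem.Str.rfind lower word
      let e := if last ≠ -1 then max se.2 (last + PySem.Str.len word) else se.2
      (s, e)) (a, b)
    = ((pvCandAS lower.toList V).foldl pvMinStep a, (pvCandAE lower.toList V).foldl max b) := by
  induction V with
  | nil => intro a b; rfl
  | cons w V ih =>
    intro a b
    simp only [List.foldl_cons]
    rw [ih]
    unfold pvCandAS pvCandAE
    simp only [List.filterMap_cons]
    by_cases h1 : PySem.Chars.find lower.toList w.toList = -1 <;>
      by_cases h2 : PySem.Chars.rfind lower.toList w.toList = -1 <;>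
        simp [h1, h2, pvMinStep, PySem.Str.find_eq, PySem.Str.rfind_eq]

theorem pv_B_inner (lower : String) (V : List String) (i : Nat) (ls : List Int) : ∀ (a b : Int),
    ls.foldl (fun (se : Int × Int) L =>
        let sub := PySem.Str.slice lower (some (i : Int)) (some ((i : Int) + L))
        if V.contains sub then
          ((if se.1 = -1 then (i : Int) else se.1),
           (if (i : Int) + PySem.Str.len sub > se.2 then (i : Int) + PySem.Str.len sub else se.2))
        else se) (a, b)
    = ((ls.filterMap (fun L => if V.contains (pvSub lower (i : Int) L) then some (i : Int) else none)).foldl pvFstStep a,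
       (ls.filterMap (fun L => if V.contains (pvSub lower (i : Int) L) then
          some ((i : Int) + PySem.Str.len (pvSub lower (i : Int) L)) else none)).foldl max b) := by
  induction ls with
  | nil => intro a b; rfl
  | cons L ls ih =>
    intro a b
    simp only [List.foldl_cons, List.filterMap_cons]
    unfold pvSub
    by_cases h : V.contains (PySem.Str.slice lower (some (i : Int)) (some ((i : Int) + L))) = true <;>
      simp only [h, ite_true, ite_false, Bool.false_eq_true] <;>
        rw [ih] <;> simp [pvSub, pvFstStep, pv_max_ite]

theorem pv_B_outer (lower : String) (V : List String) : ∀ (is : List Nat) (a b : Int),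
    (is.map Int.ofNat).foldl (fun (se : Int × Int) i =>
      (PySem.List.sorted (PySem.Set.ofList (V.map PySem.Str.len)) (fun x => x) false).foldl
        (fun (se : Int × Int) L =>
          let sub := PySem.Str.slice lower (some i) (some (i + L))
          if V.contains sub then
            ((if se.1 = -1 then i else se.1),
             (if i + PySem.Str.len sub > se.2 then i + PySem.Str.len sub else se.2))
          else se) se) (a, b)
    = ((is.flatMap (fun (i : Nat) => (pvLens V).filterMap (fun L =>
          if V.contains (pvSub lower (i : Int) L) then some (i : Int) else none))).foldl pvFstStep a,
       (is.flatMap (fun (i : Nat) => (pvLens V).filterMap (fun L =>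
          if V.contains (pvSub lower (i : Int) L) then
            some ((i : Int) + PySem.Str.len (pvSub lower (i : Int) L)) else none))).foldl max b) := by
  intro is
  induction is with
  | nil => intro a b; rfl
  | cons j is ih =>
    intro a b
    simp only [List.map_cons, List.foldl_cons, List.flatMap_cons, List.foldl_append]
    have hj : Int.ofNat j = (j : Int) := rfl
    rw [hj]
    have hlens : PySem.List.sorted (PySem.Set.ofList (V.map PySem.Str.len)) (fun x => x) false = pvLens V := rfl
    rw [hlens, pv_B_inner lower V j (pvLens V) a b]
    exact ih _ _

theorem pv_B_fold (lower : String) (V : List String) :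
    (PySem.List.pyRange 0 (PySem.Str.len lower + 1)).foldl (fun (se : Int × Int) i =>
      (PySem.List.sorted (PySem.Set.ofList (V.map PySem.Str.len)) (fun x => x) false).foldl
        (fun (se : Int × Int) L =>
          let sub := PySem.Str.slice lower (some i) (some (i + L))
          if V.contains sub then
            ((if se.1 = -1 then i else se.1),
             (if i + PySem.Str.len sub > se.2 then i + PySem.Str.len sub else se.2))
          else se) se) (-1, -1)
    = ((pvCandBS lower V).foldl pvFstStep (-1), (pvCandBE lower V).foldl max (-1)) := by
  have hlen : PySem.Str.len lower + 1 = ((lower.toList.length + 1 : Nat) : Int) := by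
    unfold PySem.Str.len; push_cast; ring
  rw [hlen, pv_pyRange_natCast]
  exact pv_B_outer lower V (List.range (lower.toList.length + 1)) (-1) (-1)

-- ===== VERDICT (by name: the statement is the Claim_ definition above) =====
theorem vocab_hits_spec : Claim_equal_vocab_hits := by
  intro text vocab key _
  unfold Spec_vocab_hits vocab_hits vocab_hits_alt
  simp only []
  rw [pv_A_fold, pv_B_fold]
  have hS : (pvCandAS (PySem.Str.lower text).toList vocab).foldl pvMinStep (-1)
      = (pvCandBS (PySem.Str.lower text) vocab).foldl pvFstStep (-1) := by
    rw [pv_fstfold_eq_nfold _ (pv_candBS_sorted _ _) (pv_candBS_nonneg _ _)]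
    exact pv_nfold_eq_of_dom _ _ (pv_candAS_nonneg _ _) (pv_candBS_nonneg _ _)
      (pv_start_dom1 _ _) (pv_start_dom2 _ _)
  have hE : (pvCandAE (PySem.Str.lower text).toList vocab).foldl max (-1)
      = (pvCandBE (PySem.Str.lower text) vocab).foldl max (-1) :=
    pv_mfold_eq_of_dom _ _ (pv_end_dom1 _ _) (pv_end_dom2 _ _)
  have hSE : (pvCandAS (PySem.Str.lower text).toList vocab).foldl pvMinStep (-1) = -1 ↔
      (pvCandAE (PySem.Str.lower text).toList vocab).foldl max (-1) = -1 := by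
    rw [pv_nfold_neg_iff _ (pv_candAS_nonneg _ _), pv_mfold_neg_iff _ (pv_candAE_nonneg _ _)]
    exact pv_AS_AE_nil _ _
  rw [← hS, ← hE]
  by_cases h : (pvCandAS (PySem.Str.lower text).toList vocab).foldl pvMinStep (-1) = -1
  · rw [if_pos (Or.inl h), if_pos h]
  · rw [if_neg ?_, if_neg h]
    rintro (h1 | h2)
    · exact h h1
    · exact h (hSE.mpr h2)
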